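-- pv_equiv track=rewrite | github.com/mordecaimaic/cs61a | lab/DISC_01/disc_01.py | has_digit
-- ===== SOURCE A (Python) =====
-- def has_digit(n, k):
--     """Returns whether k is a digit in n.
--
--     >>> has_digit(10, 1)
--     True
--     >>> has_digit(12, 7)
--     False
--     """
--     assert k >= 0 and k < 10
--     "*** YOUR CODE HERE ***"
--     while (n > 0):
--         if n % 10 == k:
--             return True
--         n = n // 10
--     return False
-- ===== SOURCE B (Python) =====
-- def has_digit(n, k):
--     """Returns whether k is a digit in n."""
--     assert k >= 0 and k < 10
--     return n > 0 and str(k) in str(n)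
-- ===== Notes on version B (the rewrite author's own statement) =====
-- stated objective: idiomatic
-- what changed: Replaces the arithmetic while-loop extracting digits with //10 and %10 by a single-character membership test on the decimal string representation (str(k) in str(n)).
import Mathlib
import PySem

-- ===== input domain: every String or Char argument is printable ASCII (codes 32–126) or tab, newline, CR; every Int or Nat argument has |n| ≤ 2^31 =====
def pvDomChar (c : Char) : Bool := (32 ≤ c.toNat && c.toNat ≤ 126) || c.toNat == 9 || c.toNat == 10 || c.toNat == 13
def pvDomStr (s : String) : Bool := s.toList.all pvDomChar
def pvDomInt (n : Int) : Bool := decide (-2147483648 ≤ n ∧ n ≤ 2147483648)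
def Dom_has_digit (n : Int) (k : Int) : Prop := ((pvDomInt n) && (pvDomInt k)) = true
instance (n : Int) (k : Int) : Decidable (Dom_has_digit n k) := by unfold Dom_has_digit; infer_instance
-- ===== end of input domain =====

-- B replaces the arithmetic digit-extraction loop by a string membership test (str(k) in str(n)): same cost, more idiomatic.


-- ===== PORT A =====
-- while (n > 0): if n % 10 == k: return True; n = n // 10  — structural recursion on n.toNat
def has_digit (n : Int) (k : Int) : Bool :=
  if h : 0 < n then
    if PySem.Int.mod n 10 == k then true
    else has_digit (PySem.Int.floordiv n 10) k
  else false
termination_by n.toNat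
decreasing_by
  rw [PySem.Int.floordiv_eq_ediv_of_pos (by omega : (0:Int) < 10)]
  omega

-- ===== PORT B =====
-- return n > 0 and str(k) in str(n)
def has_digit_alt (n : Int) (k : Int) : Bool :=
  decide (0 < n) && PySem.Str.isIn (PySem.Int.toStr k) (PySem.Int.toStr n)

-- ===== PRECONDITION & SPEC =====
-- Pre_ excludes exactly the inputs on which A's assert fails (k < 0 or k ≥ 10: AssertionError).
def Pre_has_digit (n : Int) (k : Int) : Prop := 0 ≤ k ∧ k < 10
instance (n : Int) (k : Int) : Decidable (Pre_has_digit n k) := by unfold Pre_has_digit; infer_instance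
def pvWitness_has_digit : Int × Int := (10, 1)

def Spec_has_digit (n : Int) (k : Int) (out : Bool) : Prop := out = has_digit_alt n k
instance (n : Int) (k : Int) (out : Bool) : Decidable (Spec_has_digit n k out) := by unfold Spec_has_digit; infer_instance

-- ===== CLAIM (what is proved, stated in full; the proofs are below) =====
def Claim_equal_has_digit : Prop := ∀ (n : Int) (k : Int), Dom_has_digit n k → Pre_has_digit n k → Spec_has_digit n k (has_digit n k)

-- ===== LEMMAS AND PROOFS =====

-- The decimal-digit characters of a natural number, most significant last reversed order
-- (dch m lists digitChar (m % 10), then digits of m / 10 when nonzero): mirrors toDigitsCore's emission order reversed.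
def dch (m : Nat) : List Char :=
  Nat.digitChar (m % 10) :: (if h : m / 10 = 0 then [] else dch (m / 10))
termination_by m
decreasing_by exact Nat.div_lt_self (by omega) (by omega)

theorem toDigitsCore_eq_dch : ∀ (fuel m : Nat) (ds : List Char), m < fuel →
    Nat.toDigitsCore 10 fuel m ds = (dch m).reverse ++ ds := by
  intro fuel
  induction fuel with
  | zero => omega
  | succ f ih =>
    intro m ds hm
    rw [Nat.toDigitsCore, dch]
    by_cases h : m / 10 = 0
    · simp [h]
    · have hrec : m / 10 < f := by
        have h1 : 0 < m := Nat.pos_of_ne_zero (fun hz => h (by simp [hz]))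
        have h2 := Nat.div_lt_self h1 (by norm_num : 1 < 10)
        omega
      simp only [h, if_false]
      rw [ih (m / 10) _ hrec]
      simp

theorem toDigits_eq_dch (m : Nat) : Nat.toDigits 10 m = (dch m).reverse := by
  rw [Nat.toDigits, toDigitsCore_eq_dch (m + 1) m [] (by omega)]
  simp

theorem digitChar_inj {a b : Nat} (ha : a < 10) (hb : b < 10) :
    Nat.digitChar a = Nat.digitChar b ↔ a = b := by
  interval_cases a <;> interval_cases b <;> simp [Nat.digitChar]

-- A's loop returns true iff digitChar k.toNat occurs among the decimal digit characters of n.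
theorem has_digit_iff_mem (n k : Int) (hn : 0 < n) (hk0 : 0 ≤ k) (hk : k < 10) :
    has_digit n k = true ↔ Nat.digitChar k.toNat ∈ dch n.toNat := by
  have hfd : PySem.Int.floordiv n 10 = n / 10 :=
    PySem.Int.floordiv_eq_ediv_of_pos (by omega)
  have hmd : PySem.Int.mod n 10 = n % 10 :=
    PySem.Int.mod_eq_emod_of_pos (by omega)
  rw [has_digit, dif_pos hn, dch]
  have hdigit : (n % 10).toNat = n.toNat % 10 := by omega
  have hchar : (Nat.digitChar k.toNat = Nat.digitChar (n.toNat % 10)) ↔ (n % 10 = k) := by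
    rw [digitChar_inj (by omega) (by omega)]
    omega
  by_cases heq : PySem.Int.mod n 10 == k
  · simp only [heq, if_true]
    have : n % 10 = k := by rw [hmd] at heq; simpa using heq
    simp [List.mem_cons, hchar, this]
  · simp only [heq, Bool.false_eq_true, if_false]
    have hne : ¬ (n % 10 = k) := by
      intro h; apply heq; rw [hmd]; simpa using h
    by_cases hdvd : n / 10 = 0
    · -- n < 10: no further digits
      have hz : n.toNat / 10 = 0 := by omega
      rw [dif_pos hz]
      have : ¬ 0 < PySem.Int.floordiv n 10 := by rw [hfd, hdvd]; omega
      rw [has_digit, dif_neg this]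
      simp
      intro hc
      exact hne (hchar.mp hc)
    · have hz : ¬ n.toNat / 10 = 0 := by omega
      rw [dif_neg hz]
      have hpos : 0 < n / 10 := by omega
      have hto : (n / 10).toNat = n.toNat / 10 := by omega
      rw [hfd]
      rw [has_digit_iff_mem (n / 10) k hpos hk0 hk, hto]
      simp only [List.mem_cons]
      constructor
      · intro h; right; exact h
      · rintro (hc | h)
        · exact absurd (hchar.mp hc) hne
        · exact h
termination_by n.toNat
decreasing_by omega

-- ===== VERDICT (by name: the statement is the Claim_ definition above) =====
theorem has_digit_spec : Claim_equal_has_digit := by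
  intro n k _ hpre
  obtain ⟨hk0, hk⟩ := hpre
  unfold Spec_has_digit has_digit_alt
  by_cases hn : 0 < n
  · have hB : (PySem.Int.toStr k).toList = [Nat.digitChar k.toNat] := by
      rw [PySem.Int.toList_toStr, PySem.Int.toChars]
      rw [if_neg (by omega : ¬ k < 0)]
      rw [toDigits_eq_dch, dch]
      rw [dif_pos (by omega : k.toNat / 10 = 0)]
      simp [Nat.mod_eq_of_lt (show k.toNat < 10 by omega)]
    have hN : (PySem.Int.toStr n).toList = (dch n.toNat).reverse := by
      rw [PySem.Int.toList_toStr, PySem.Int.toChars, if_neg (by omega : ¬ n < 0),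
        toDigits_eq_dch]
    rw [PySem.Str.isIn_eq, hB, hN]
    simp only [decide_eq_true hn, Bool.true_and]
    rcases h : has_digit n k with _ | _
    · have := (has_digit_iff_mem n k hn hk0 hk).not.mp (by simp [h])
      symm
      rw [PySem.Chars.isIn_eq_false_iff, List.singleton_infix_iff]
      simpa using this
    · have := (has_digit_iff_mem n k hn hk0 hk).mp h
      symm
      rw [PySem.Chars.isIn_iff_infix, List.singleton_infix_iff]
      simpa using this
  · rw [has_digit, dif_neg hn]
    simp [hn]
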